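-- pv_equiv track=rewrite | github.com/tendai98/Projects | TX500/TX500_Console/vxCE.py | packVXCode
-- ===== SOURCE A (Python) =====
-- def packVXCode(codeLines=None):
--     if (codeLines!=None and type(codeLines) == list):
--
--         try:
--
--             parsedProgramCode = []
--             parsedCode = []
--
--             for code in codeLines:
--                 symbols = code.split(" ")
--                 for symbol in symbols:
--                     if symbol != "":
--                         if ("," in symbol):
--                             subsymbols = symbol.split(",")
--                             for subsymbol in subsymbols:
--                                 if (subsymbol != ""):
--                                     parsedCode.append(subsymbol.replace("\n",""))
--                         else:
--                             parsedCode.append(symbol.replace("\n",""))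
--
--                 parsedProgramCode.append(parsedCode)
--                 parsedCode=[]
--
--             return parsedProgramCode
--
--         except Exception as e:
--             return None
--
--     else:
--         return None
-- ===== SOURCE B (Python) =====
-- def packVXCode(codeLines=None):
--     if codeLines is None or type(codeLines) != list:
--         return None
--     parsedProgramCode = []
--     for code in codeLines:
--         tokens = []
--         cur = ""
--         for ch in code:
--             if ch == " " or ch == ",":
--                 if cur != "":
--                     tokens.append(cur.replace("\n", ""))
--                 cur = ""
--             else:
--                 cur += ch
--         if cur != "":
--             tokens.append(cur.replace("\n", ""))
--         parsedProgramCode.append(tokens)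
--     return parsedProgramCode
-- ===== Notes on version B (the rewrite author's own statement) =====
-- stated objective: alternative
-- what changed: Replaced A's nested splits (split on ' ', then a conditional split of each symbol on ',') with a single left-to-right character scan per line that flushes the current token at each space/comma.
import Mathlib
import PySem

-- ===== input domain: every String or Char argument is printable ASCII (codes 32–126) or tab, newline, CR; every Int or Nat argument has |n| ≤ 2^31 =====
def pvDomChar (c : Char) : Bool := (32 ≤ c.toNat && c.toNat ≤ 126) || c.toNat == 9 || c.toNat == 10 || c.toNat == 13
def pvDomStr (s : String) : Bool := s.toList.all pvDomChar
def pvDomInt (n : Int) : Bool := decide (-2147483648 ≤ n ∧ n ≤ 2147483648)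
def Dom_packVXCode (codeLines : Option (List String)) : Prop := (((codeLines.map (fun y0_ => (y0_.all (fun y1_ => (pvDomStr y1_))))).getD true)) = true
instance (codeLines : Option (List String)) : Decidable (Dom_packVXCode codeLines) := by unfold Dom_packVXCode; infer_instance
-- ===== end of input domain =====

-- B replaces A's nested space-split / conditional comma-split per line with a single
-- left-to-right character scan (alternative decomposition, same observable result).

-- ===== PORT A =====
-- literal transliteration of A: split each line on " ", then per symbol a conditional split on ","
def packVXCode (codeLines : Option (List String)) : Option (List (List String)) :=
  match codeLines with
  | none => none
  | some lines =>
    some (lines.foldl (fun parsedProgramCode code =>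
      let symbols := PySem.Chars.splitOn code.toList [' ']
      let parsedCode := symbols.foldl (fun pc symbol =>
        if symbol ≠ [] then
          if PySem.Chars.isIn [','] symbol then
            (PySem.Chars.splitOn symbol [',']).foldl (fun pc2 subsymbol =>
              if subsymbol ≠ [] then
                pc2 ++ [String.ofList (PySem.Chars.replace subsymbol ['\n'] [])]
              else pc2) pc
          else pc ++ [String.ofList (PySem.Chars.replace symbol ['\n'] [])]
        else pc) []
      parsedProgramCode ++ [parsedCode]) [])

-- ===== PORT B =====
-- literal transliteration of B's per-line character scan (cur = the token being built)
def packVXLine : List Char → List Char → List String → List String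
  | [], cur, tokens =>
    if cur = [] then tokens
    else tokens ++ [String.ofList (PySem.Chars.replace cur ['\n'] [])]
  | c :: rest, cur, tokens =>
    if c = ' ' || c = ',' then
      packVXLine rest []
        (if cur = [] then tokens
         else tokens ++ [String.ofList (PySem.Chars.replace cur ['\n'] [])])
    else packVXLine rest (cur ++ [c]) tokens

def packVXCode_alt (codeLines : Option (List String)) : Option (List (List String)) :=
  match codeLines with
  | none => none
  | some lines => some (lines.map (fun code => packVXLine code.toList [] []))

-- ===== PRECONDITION & SPEC =====
def Spec_packVXCode (codeLines : Option (List String)) (out : Option (List (List String))) : Prop := out = packVXCode_alt codeLines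
instance (codeLines : Option (List String)) (out : Option (List (List String))) : Decidable (Spec_packVXCode codeLines out) := by unfold Spec_packVXCode; infer_instance

-- ===== CLAIM (what is proved, stated in full; the proofs are below) =====
def Claim_equal_packVXCode : Prop := ∀ (codeLines : Option (List String)), Dom_packVXCode codeLines → Spec_packVXCode codeLines (packVXCode codeLines)

-- ===== LEMMAS AND PROOFS =====
def splitC (d : Char) : List Char → List (List Char)
  | [] => [[]]
  | c :: cs => if c = d then [] :: splitC d cs
               else (c :: (splitC d cs).headI) :: (splitC d cs).tail

theorem splitC_ne_nil (d : Char) (l : List Char) : splitC d l ≠ [] := by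
  cases l <;> simp [splitC] ; split <;> simp

theorem splitC_headI_tail (d : Char) (l : List Char) :
    (splitC d l).headI :: (splitC d l).tail = splitC d l := by
  cases h : splitC d l with
  | nil => exact absurd h (splitC_ne_nil d l)
  | cons a t => simp

theorem splitOn_go_spec (d : Char) (l : List Char) : ∀ (fuel : Nat), l.length ≤ fuel →
    ∀ (cur : List Char) (acc : List (List Char)),
    PySem.Chars.splitOn.go [d] fuel l cur acc
      = acc.reverse ++ (cur.reverse ++ (splitC d l).headI) :: (splitC d l).tail := by
  induction l with
  | nil =>
    intro fuel _ cur acc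
    cases fuel <;> simp [PySem.Chars.splitOn.go, splitC]
  | cons c rest ih =>
    intro fuel hf cur acc
    cases fuel with
    | zero => simp at hf
    | succ f =>
      simp only [PySem.Chars.splitOn.go]
      by_cases hdc : d = c
      · subst hdc
        rw [if_pos (by simp [List.isPrefixOf])]
        simp only [List.length_cons, List.length_nil, List.drop_succ_cons, List.drop_zero]
        rw [ih f (by simpa using hf) [] (cur.reverse :: acc)]
        have : splitC d (d :: rest) = [] :: splitC d rest := by simp [splitC]
        rw [this]
        simp [splitC_headI_tail]
      · rw [if_neg (by simp [List.isPrefixOf]; exact fun h => absurd h hdc)]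
        rw [ih f (by simpa using hf) (c :: cur) acc]
        have : splitC d (c :: rest) = (c :: (splitC d rest).headI) :: (splitC d rest).tail := by
          simp [splitC, Ne.symm hdc]
        rw [this]
        simp

theorem splitOn_singleton (d : Char) (l : List Char) :
    PySem.Chars.splitOn l [d] = splitC d l := by
  rw [PySem.Chars.splitOn, splitOn_go_spec d l (l.length+1) (by omega) [] []]
  simp [splitC_headI_tail]

theorem replace_go_spec (d : Char) (l : List Char) : ∀ (fuel : Nat), l.length ≤ fuel →
    ∀ (acc : List Char),
    PySem.Chars.replace.go [d] [] fuel l acc = acc.reverse ++ l.filter (· ≠ d) := by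
  induction l with
  | nil => intro fuel _ acc; cases fuel <;> simp [PySem.Chars.replace.go]
  | cons c rest ih =>
    intro fuel hf acc
    cases fuel with
    | zero => simp at hf
    | succ f =>
      simp only [PySem.Chars.replace.go]
      by_cases hdc : d = c
      · subst hdc
        rw [if_pos (by simp [List.isPrefixOf])]
        simp only [List.length_cons, List.length_nil, List.drop_succ_cons, List.drop_zero,
          List.reverse_nil, List.nil_append]
        rw [ih f (by simpa using hf) acc]
        simp
      · rw [if_neg (by simp [List.isPrefixOf]; exact fun h => absurd h hdc)]
        rw [ih f (by simpa using hf) (c :: acc)]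
        simp [List.filter_cons, Ne.symm hdc]

theorem replace_singleton (d : Char) (l : List Char) :
    PySem.Chars.replace l [d] [] = l.filter (· ≠ d) := by
  rw [PySem.Chars.replace]
  simp only [List.isEmpty_iff, reduceCtorEq, if_false]
  exact replace_go_spec d l l.length le_rfl []

def tokC : List Char → List Char → List (List Char)
  | [], cur => if cur = [] then [] else [cur]
  | c :: cs, cur =>
    if c = ' ' || c = ',' then (if cur = [] then [] else [cur]) ++ tokC cs []
    else tokC cs (cur ++ [c])

def repNL (cs : List Char) : String := String.ofList (cs.filter (· ≠ '\n'))

def f2 (sym : List Char) : List (List Char) := (splitC ',' sym).filter (· ≠ [])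

theorem splitC_append_not_mem (d : Char) {xs : List Char} (ys : List Char) (h : d ∉ xs) :
    splitC d (xs ++ ys) = (xs ++ (splitC d ys).headI) :: (splitC d ys).tail := by
  induction xs with
  | nil => simpa using (splitC_headI_tail d ys).symm
  | cons x xs ih =>
    simp only [List.mem_cons, not_or] at h
    simp [splitC, ih h.2, Ne.symm h.1]

theorem splitC_not_mem (d : Char) {xs : List Char} (h : d ∉ xs) : splitC d xs = [xs] := by
  simpa [splitC] using splitC_append_not_mem d [] h

theorem f2_not_mem {xs : List Char} (h : ',' ∉ xs) :
    f2 xs = if xs = [] then [] else [xs] := by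
  rw [f2, splitC_not_mem ',' h]
  split <;> simp_all

theorem tok_main (cs : List Char) : ∀ cur : List Char, (' ' ∉ cur) → (',' ∉ cur) →
    f2 (cur ++ (splitC ' ' cs).headI) ++ ((splitC ' ' cs).tail).flatMap f2 = tokC cs cur := by
  induction cs with
  | nil =>
    intro cur h1 h2
    simp [splitC, tokC, f2_not_mem h2]
  | cons c cs ih =>
    intro cur h1 h2
    have hIH : f2 (splitC ' ' cs).headI ++ List.flatMap f2 (splitC ' ' cs).tail = tokC cs [] := by
      simpa using ih [] (by simp) (by simp)
    by_cases hsp : c = ' '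
    · subst hsp
      have hsplit : splitC ' ' (' ' :: cs) = [] :: splitC ' ' cs := by simp [splitC]
      have hflat : List.flatMap f2 (splitC ' ' cs) = tokC cs [] := by
        conv_lhs => rw [← splitC_headI_tail ' ' cs]
        rw [List.flatMap_cons]; exact hIH
      rw [hsplit]
      simp only [List.headI_cons, List.tail_cons, List.append_nil]
      rw [hflat, f2_not_mem h2]
      simp [tokC]
    · by_cases hcm : c = ','
      · subst hcm
        have hsplit : splitC ' ' (',' :: cs)
            = (',' :: (splitC ' ' cs).headI) :: (splitC ' ' cs).tail := by
          simp [splitC]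
        have hf2 : f2 (cur ++ ',' :: (splitC ' ' cs).headI)
            = (if cur = [] then [] else [cur]) ++ f2 (splitC ' ' cs).headI := by
          rw [f2, splitC_append_not_mem ',' _ h2]
          have h0 : splitC ',' (',' :: (splitC ' ' cs).headI)
              = [] :: splitC ',' (splitC ' ' cs).headI := by simp [splitC]
          rw [h0]
          simp only [List.headI_cons, List.tail_cons, List.append_nil, List.filter_cons]
          split <;> simp_all [f2]
        rw [hsplit]
        simp only [List.headI_cons, List.tail_cons]
        rw [hf2, List.append_assoc, hIH]
        simp [tokC]
      · have hsplit : splitC ' ' (c :: cs)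
            = (c :: (splitC ' ' cs).headI) :: (splitC ' ' cs).tail := by
          simp only [splitC, if_neg hsp]
        rw [hsplit]
        simp only [List.headI_cons, List.tail_cons]
        rw [show cur ++ c :: (splitC ' ' cs).headI
              = (cur ++ [c]) ++ (splitC ' ' cs).headI by simp]
        rw [ih (cur ++ [c]) (by simp [h1, Ne.symm hsp]) (by simp [h2, Ne.symm hcm])]
        simp [tokC, hsp, hcm]

theorem altLine_spec (cs : List Char) : ∀ cur tokens,
    packVXLine cs cur tokens = tokens ++ (tokC cs cur).map repNL := by
  induction cs with
  | nil =>
    intro cur tokens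
    simp only [packVXLine, tokC, replace_singleton]
    split <;> simp [repNL]
  | cons c rest ih =>
    intro cur tokens
    simp only [packVXLine, tokC, replace_singleton]
    split
    · rw [ih]
      split <;> simp [repNL]
    · rw [ih]

theorem inner2 (subs : List (List Char)) : ∀ pc : List String,
    subs.foldl (fun pc2 subsymbol =>
      if subsymbol ≠ [] then pc2 ++ [String.ofList (PySem.Chars.replace subsymbol ['\n'] [])]
      else pc2) pc
    = pc ++ (subs.filter (· ≠ [])).map repNL := by
  induction subs with
  | nil => simp
  | cons s ss ih =>
    intro pc
    rw [List.foldl_cons, ih]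
    by_cases hs : s = [] <;> simp [hs, List.filter_cons, replace_singleton, repNL]

theorem mem_of_isIn_singleton {d : Char} {l : List Char} (h : PySem.Chars.isIn [d] l = false) :
    d ∉ l := by
  intro hm
  rw [PySem.Chars.isIn_eq_false_iff] at h
  obtain ⟨s, t, rfl⟩ := List.append_of_mem hm
  exact h ⟨s, t, by simp⟩

theorem lineA_eq (cs : List Char) :
    (PySem.Chars.splitOn cs [' ']).foldl (fun pc symbol =>
      if symbol ≠ [] then
        if PySem.Chars.isIn [','] symbol then
          (PySem.Chars.splitOn symbol [',']).foldl (fun pc2 subsymbol =>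
            if subsymbol ≠ [] then
              pc2 ++ [String.ofList (PySem.Chars.replace subsymbol ['\n'] [])]
            else pc2) pc
        else pc ++ [String.ofList (PySem.Chars.replace symbol ['\n'] [])]
      else pc) []
    = (tokC cs []).map repNL := by
  have hbody : ∀ (pc : List String) (sym : List Char),
      (if sym ≠ [] then
        if PySem.Chars.isIn [','] sym then
          (PySem.Chars.splitOn sym [',']).foldl (fun pc2 subsymbol =>
            if subsymbol ≠ [] then
              pc2 ++ [String.ofList (PySem.Chars.replace subsymbol ['\n'] [])]
            else pc2) pc
        else pc ++ [String.ofList (PySem.Chars.replace sym ['\n'] [])]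
      else pc) = pc ++ (f2 sym).map repNL := by
    intro pc sym
    by_cases hs : sym = []
    · simp [hs, f2, splitC]
    · rw [if_pos hs]
      by_cases hIn : PySem.Chars.isIn [','] sym
      · rw [if_pos hIn, splitOn_singleton, inner2, f2]
      · rw [if_neg hIn, f2_not_mem (mem_of_isIn_singleton (by simpa using hIn)),
          if_neg hs, replace_singleton]
        simp [repNL]
  have hfold : ∀ (syms : List (List Char)) (pc : List String),
      syms.foldl (fun pc symbol =>
        if symbol ≠ [] then
          if PySem.Chars.isIn [','] symbol then
            (PySem.Chars.splitOn symbol [',']).foldl (fun pc2 subsymbol =>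
              if subsymbol ≠ [] then
                pc2 ++ [String.ofList (PySem.Chars.replace subsymbol ['\n'] [])]
              else pc2) pc
          else pc ++ [String.ofList (PySem.Chars.replace symbol ['\n'] [])]
        else pc) pc
      = pc ++ (syms.flatMap f2).map repNL := by
    intro syms
    induction syms with
    | nil => simp
    | cons s ss ih =>
      intro pc
      rw [List.foldl_cons, hbody pc s, ih]
      simp
  rw [splitOn_singleton, hfold]
  have hflat : List.flatMap f2 (splitC ' ' cs) = tokC cs [] := by
    conv_lhs => rw [← splitC_headI_tail ' ' cs]
    rw [List.flatMap_cons]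
    simpa using tok_main cs [] (by simp) (by simp)
  rw [hflat]
  simp

theorem foldl_lines (lines : List String) : ∀ acc : List (List String),
    lines.foldl (fun parsedProgramCode code =>
      let symbols := PySem.Chars.splitOn code.toList [' ']
      let parsedCode := symbols.foldl (fun pc symbol =>
        if symbol ≠ [] then
          if PySem.Chars.isIn [','] symbol then
            (PySem.Chars.splitOn symbol [',']).foldl (fun pc2 subsymbol =>
              if subsymbol ≠ [] then
                pc2 ++ [String.ofList (PySem.Chars.replace subsymbol ['\n'] [])]
              else pc2) pc
          else pc ++ [String.ofList (PySem.Chars.replace symbol ['\n'] [])]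
        else pc) []
      parsedProgramCode ++ [parsedCode]) acc
    = acc ++ lines.map (fun code => packVXLine code.toList [] []) := by
  induction lines with
  | nil => intro acc; simp
  | cons code rest ih =>
    intro acc
    rw [List.foldl_cons, ih]
    have h1 := lineA_eq code.toList
    have h2 := altLine_spec code.toList [] []
    simp only [List.nil_append] at h2
    simp only []
    rw [h1, ← h2]
    simp

-- ===== VERDICT (by name: the statement is the Claim_ definition above) =====
theorem packVXCode_spec : Claim_equal_packVXCode := by
  intro codeLines _
  unfold Spec_packVXCode
  match codeLines with
  | none => rfl
  | some lines =>
    simp only [packVXCode, packVXCode_alt]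
    rw [foldl_lines lines []]
    simp
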